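-- pv_equiv track=rewrite | github.com/Uks130322/yandex_algs_6.0 | algs_6_2/task_F.py | trial_product
-- ===== SOURCE A (Python) =====
-- def trial_product(quantity: int, numbers: list[int]) -> list[int]:
--     summa = 0
--     prefix_sum = []
--
--     for index in range(quantity-1, -1, -1):
--         if not prefix_sum:
--             prefix_sum = [numbers[index]]
--         else:
--             prefix_sum.append(prefix_sum[-1] + numbers[index])
--
--     index = 0
--     while index < quantity - 2:
--         summa += (prefix_sum[index]
--                   * numbers[quantity - index - 2]
--                   * (prefix_sum[-1] - prefix_sum[index + 1])
--                   % 1_000_000_007)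
--         summa %= 1_000_000_007
--         index += 1
--
--     return summa
-- ===== SOURCE B (Python) =====
-- def trial_product(quantity: int, numbers: list[int]) -> int:
--     # Newton's identity: e3 = (p1^3 - 3*p1*p2 + 2*p3) / 6 over the first `quantity` elements.
--     p1 = p2 = p3 = 0
--     for index in range(quantity):
--         x = numbers[index]
--         p1 += x
--         p2 += x * x
--         p3 += x * x * x
--     e3 = (p1 * p1 * p1 - 3 * p1 * p2 + 2 * p3) // 6
--     return e3 % 1_000_000_007
-- ===== Notes on version B (the rewrite author's own statement) =====
-- stated objective: simpler
-- what changed: Replaces the suffix-sum list plus prefix/suffix sweep over middle elements by a single pass accumulating power sums p1,p2,p3 and the closed-form Newton identity e3 = (p1^3 - 3*p1*p2 + 2*p3)//6, reduced mod 1_000_000_007 once at the end (no intermediate list, no per-term mod).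
import Mathlib
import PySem

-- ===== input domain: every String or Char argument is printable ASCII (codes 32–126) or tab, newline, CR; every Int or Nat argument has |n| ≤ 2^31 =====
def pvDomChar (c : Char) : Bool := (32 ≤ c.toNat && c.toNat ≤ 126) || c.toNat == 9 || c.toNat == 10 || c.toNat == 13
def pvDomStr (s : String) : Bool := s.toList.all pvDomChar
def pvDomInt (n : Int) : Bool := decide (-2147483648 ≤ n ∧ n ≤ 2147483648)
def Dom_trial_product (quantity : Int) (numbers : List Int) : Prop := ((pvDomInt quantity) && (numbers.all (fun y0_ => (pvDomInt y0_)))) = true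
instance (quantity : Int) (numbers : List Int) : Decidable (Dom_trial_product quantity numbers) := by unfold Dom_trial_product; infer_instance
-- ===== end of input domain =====

-- B replaces A's suffix-sum list and middle-element sweep by one pass of power sums and
-- Newton's closed form e3 = (p1^3 - 3 p1 p2 + 2 p3)/6; objective: simpler.

-- ===== PORT A =====
def trial_product (quantity : Int) (numbers : List Int) : Int :=
  let prefix_sum := (PySem.List.pyRange (quantity - 1) (-1) (-1)).foldl
    (fun ps index =>
      if ps.isEmpty then [PySem.List.pyGetD numbers index 0]
      else ps ++ [PySem.List.pyGetD ps (-1) 0 + PySem.List.pyGetD numbers index 0]) []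
  (PySem.List.pyRange 0 (quantity - 2) 1).foldl
    (fun summa index =>
      PySem.Int.mod
        (summa +
          PySem.Int.mod
            (PySem.List.pyGetD prefix_sum index 0 *
             PySem.List.pyGetD numbers (quantity - index - 2) 0 *
             (PySem.List.pyGetD prefix_sum (-1) 0 - PySem.List.pyGetD prefix_sum (index + 1) 0))
            1000000007)
        1000000007) 0

-- ===== PORT B =====
def trial_product_alt (quantity : Int) (numbers : List Int) : Int :=
  let s := (PySem.List.pyRange 0 quantity 1).foldl
    (fun (s : Int × Int × Int) index =>
      let x := PySem.List.pyGetD numbers index 0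
      (s.1 + x, s.2.1 + x * x, s.2.2 + x * x * x)) (0, 0, 0)
  PySem.Int.mod (PySem.Int.floordiv (s.1 * s.1 * s.1 - 3 * s.1 * s.2.1 + 2 * s.2.2) 6) 1000000007

-- ===== PRECONDITION & SPEC =====
-- Pre_ excludes exactly the inputs where A raises IndexError: quantity exceeding len(numbers).
def Pre_trial_product (quantity : Int) (numbers : List Int) : Prop :=
  quantity ≤ (numbers.length : Int)
instance (quantity : Int) (numbers : List Int) : Decidable (Pre_trial_product quantity numbers) := by
  unfold Pre_trial_product; infer_instance

def pvWitness_trial_product : Int × List Int := (3, [1, 2, 3])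

def Spec_trial_product (quantity : Int) (numbers : List Int) (out : Int) : Prop := out = trial_product_alt quantity numbers
instance (quantity : Int) (numbers : List Int) (out : Int) : Decidable (Spec_trial_product quantity numbers out) := by unfold Spec_trial_product; infer_instance

-- ===== CLAIM (what is proved, stated in full; the proofs are below) =====
def Claim_equal_trial_product : Prop := ∀ (quantity : Int) (numbers : List Int), Dom_trial_product quantity numbers → Pre_trial_product quantity numbers → Spec_trial_product quantity numbers (trial_product quantity numbers)

-- ===== LEMMAS AND PROOFS =====

-- power sums and elementary symmetric functions of a list
def pvP1 : List Int → Int | [] => 0 | x :: t => x + pvP1 t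
def pvP2 : List Int → Int | [] => 0 | x :: t => x * x + pvP2 t
def pvP3 : List Int → Int | [] => 0 | x :: t => x * x * x + pvP3 t
def pvE2 : List Int → Int | [] => 0 | x :: t => x * pvP1 t + pvE2 t
def pvE3 : List Int → Int | [] => 0 | x :: t => x * pvE2 t + pvE3 t

theorem pv_newton2 (xs : List Int) : pvP1 xs * pvP1 xs - pvP2 xs = 2 * pvE2 xs := by
  induction xs with
  | nil => simp [pvP1, pvP2, pvE2]
  | cons x t ih => simp only [pvP1, pvP2, pvE2]; linear_combination ih

theorem pv_newton3 (xs : List Int) :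
    pvP1 xs * pvP1 xs * pvP1 xs - 3 * pvP1 xs * pvP2 xs + 2 * pvP3 xs = 6 * pvE3 xs := by
  induction xs with
  | nil => simp [pvP1, pvP2, pvP3, pvE3]
  | cons x t ih =>
      have h2 := pv_newton2 t
      simp only [pvP1, pvP2, pvP3, pvE3]
      linear_combination ih + 3 * x * h2

theorem pvP1_append (a b : List Int) : pvP1 (a ++ b) = pvP1 a + pvP1 b := by
  induction a with
  | nil => simp [pvP1]
  | cons x t ih => simp [pvP1, ih]; ring

theorem pvP1_take_drop (xs : List Int) (j : Nat) :
    pvP1 (xs.take j) + pvP1 (xs.drop j) = pvP1 xs := by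
  conv_rhs => rw [← List.take_append_drop j xs]
  rw [pvP1_append]

theorem pvE3_short (xs : List Int) (h : xs.length ≤ 2) : pvE3 xs = 0 := by
  rcases xs with _ | ⟨a, _ | ⟨b, _ | ⟨c, t⟩⟩⟩
  · rfl
  · simp [pvE3, pvE2]
  · simp [pvE3, pvE2, pvP1]
  · simp at h

-- the index sums behind the sweep
theorem pv_mix (t : List Int) :
    ∑ k ∈ Finset.range t.length, pvP1 (t.drop (k + 1)) * t.getD k 0 = pvE2 t := by
  induction t with
  | nil => simp [pvE2]
  | cons x t ih =>
      rw [List.length_cons, Finset.sum_range_succ']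
      simp only [List.drop_succ_cons, List.getD_cons_succ, List.drop_zero, List.getD_cons_zero]
      rw [ih]
      simp [pvE2]; ring

theorem pv_tri (xs : List Int) :
    ∑ j ∈ Finset.range xs.length,
      pvP1 (xs.drop (j + 1)) * xs.getD j 0 * pvP1 (xs.take j) = pvE3 xs := by
  induction xs with
  | nil => simp [pvE3]
  | cons x t ih =>
      rw [List.length_cons, Finset.sum_range_succ']
      simp only [List.drop_succ_cons, List.getD_cons_succ, List.take_succ_cons, List.take_zero]
      have hsplit :
          ∑ k ∈ Finset.range t.length,
              pvP1 (t.drop (k + 1)) * t.getD k 0 * pvP1 (x :: t.take k)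
            = (∑ k ∈ Finset.range t.length, pvP1 (t.drop (k + 1)) * t.getD k 0 * pvP1 (t.take k))
              + x * ∑ k ∈ Finset.range t.length, pvP1 (t.drop (k + 1)) * t.getD k 0 := by
        rw [Finset.mul_sum, ← Finset.sum_add_distrib]
        refine Finset.sum_congr rfl (fun k _ => ?_)
        simp [pvP1]; ring
      rw [hsplit, ih, pv_mix]
      simp [pvE3, pvP1]; ring

-- characterization of A's prefix_sum list
theorem pv_build_eq (numbers : List Int) (n : Nat) (hn : n ≤ numbers.length)
    (m : Nat) (hm : m ≤ n) :
    ((List.range m).map (fun (k : Nat) => (n : Int) - 1 - (k : Int))).foldl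
      (fun ps index =>
        if ps.isEmpty then [PySem.List.pyGetD numbers index 0]
        else ps ++ [PySem.List.pyGetD ps (-1) 0 + PySem.List.pyGetD numbers index 0]) []
    = (List.range m).map (fun k => pvP1 ((numbers.take n).drop (n - 1 - k))) := by
  induction m with
  | zero => simp
  | succ m ih =>
      have hm' : m ≤ n := Nat.le_of_succ_le hm
      rw [List.range_succ, List.map_append, List.map_append, List.foldl_append, ih hm']
      simp only [List.map_cons, List.map_nil, List.foldl_cons, List.foldl_nil]
      -- evaluate one more step of the builder
      have hidx : ((n : Int) - 1 - (m : Int)) = ((n - 1 - m : Nat) : Int) := by omega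
      have hlt : n - 1 - m < numbers.length := by omega
      have hltx : n - 1 - m < (numbers.take n).length := by
        rw [List.length_take]; omega
      have hnum : PySem.List.pyGetD numbers ((n : Int) - 1 - (m : Int)) 0
          = (numbers.take n)[n - 1 - m]'hltx := by
        rw [hidx, PySem.List.pyGetD_natCast]
        simp [List.getElem_take, List.getD_eq_getElem?_getD, List.getElem?_eq_getElem hlt]
      have hdrop : (numbers.take n).drop (n - 1 - m)
          = (numbers.take n)[n - 1 - m]'hltx :: (numbers.take n).drop (n - m) := by
        have h1 : n - 1 - m + 1 = n - m := by omega
        rw [List.drop_eq_getElem_cons hltx, h1]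
      cases m with
      | zero =>
          simp only [List.range_zero, List.map_nil, List.isEmpty_nil, if_true]
          rw [hnum]
          have h2 : (numbers.take n).drop (n - 0) = [] := by
            apply List.drop_eq_nil_of_le
            simp only [List.length_take, Nat.sub_zero]
            omega
          simp only [Nat.sub_zero] at hdrop h2
          simp [hdrop, h2, pvP1, List.getElem_take]
      | succ m' =>
          have e1 : (List.range (m' + 1)).map
                (fun k => pvP1 ((numbers.take n).drop (n - 1 - k)))
              = (List.range m').map (fun k => pvP1 ((numbers.take n).drop (n - 1 - k)))
                ++ [pvP1 ((numbers.take n).drop (n - 1 - m'))] := by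
            rw [List.range_succ, List.map_append]; rfl
          conv_rhs => rw [List.range_succ, List.map_append]
          rw [e1]
          rw [if_neg (show ¬((((List.range m').map
                (fun k => pvP1 ((numbers.take n).drop (n - 1 - k))))
                ++ [pvP1 ((numbers.take n).drop (n - 1 - m'))]).isEmpty = true) by simp)]
          rw [PySem.List.pyGetD_neg_one_append_singleton, hnum]
          congr 2
          rw [hdrop]
          have hdd : n - 1 - m' = n - (m' + 1) := by omega
          simp only [pvP1, hdd]
          ring

-- the accumulating mod-sum loop is the mod of the exact sum
theorem pv_summa_eq (PS numbers : List Int) (q : Int) (m : Nat) :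
    ((List.range m).map (fun (k : Nat) => (0 : Int) + (k : Int))).foldl
      (fun summa index =>
        PySem.Int.mod
          (summa +
            PySem.Int.mod
              (PySem.List.pyGetD PS index 0 *
               PySem.List.pyGetD numbers (q - index - 2) 0 *
               (PySem.List.pyGetD PS (-1) 0 - PySem.List.pyGetD PS (index + 1) 0))
              1000000007)
          1000000007) 0
    = (∑ i ∈ Finset.range m,
        PySem.List.pyGetD PS ((i : Nat) : Int) 0 *
        PySem.List.pyGetD numbers (q - ((i : Nat) : Int) - 2) 0 *
        (PySem.List.pyGetD PS (-1) 0 - PySem.List.pyGetD PS (((i : Nat) : Int) + 1) 0))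
      % 1000000007 := by
  induction m with
  | zero => simp
  | succ m ih =>
      rw [List.range_succ, List.map_append, List.foldl_append, ih]
      simp only [List.map_cons, List.map_nil, List.foldl_cons, List.foldl_nil]
      rw [Finset.sum_range_succ]
      rw [PySem.Int.mod_eq_emod_of_pos (by norm_num), PySem.Int.mod_eq_emod_of_pos (by norm_num)]
      simp only [zero_add]
      conv_rhs => rw [Int.add_emod]

theorem pv_fold3 (xs : List Int) (a b c : Int) :
    xs.foldl (fun (s : Int × Int × Int) x => (s.1 + x, s.2.1 + x * x, s.2.2 + x * x * x)) (a, b, c)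
      = (a + pvP1 xs, b + pvP2 xs, c + pvP3 xs) := by
  induction xs generalizing a b c with
  | nil => simp [pvP1, pvP2, pvP3]
  | cons x t ih => simp only [List.foldl_cons, ih, pvP1, pvP2, pvP3]; ring_nf

-- B computes pvE3 of the first `quantity` elements, mod p
theorem pv_alt_eq (quantity : Int) (numbers : List Int) (h0 : 0 ≤ quantity)
    (h : quantity ≤ (numbers.length : Int)) :
    trial_product_alt quantity numbers = pvE3 (numbers.take quantity.toNat) % 1000000007 := by
  lift quantity to Nat using h0 with n
  have hn : n ≤ numbers.length := by exact_mod_cast h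
  have hlen : (numbers.take n).length = n := by
    rw [List.length_take]; omega
  simp only [trial_product_alt, Int.toNat_natCast]
  have hcongr : (PySem.List.pyRange 0 (n : Int) 1).foldl
      (fun (s : Int × Int × Int) index =>
        let x := PySem.List.pyGetD numbers index 0
        (s.1 + x, s.2.1 + x * x, s.2.2 + x * x * x)) (0, 0, 0)
      = (PySem.List.pyRange 0 (n : Int) 1).foldl
      (fun (s : Int × Int × Int) index =>
        let x := PySem.List.pyGetD (numbers.take n) index 0
        (s.1 + x, s.2.1 + x * x, s.2.2 + x * x * x)) (0, 0, 0) := by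
    apply PySem.List.foldl_congr_mem
    intro acc j hj
    rw [PySem.List.mem_pyRange_one] at hj
    have hget : PySem.List.pyGetD numbers j 0 = PySem.List.pyGetD (numbers.take n) j 0 := by
      rw [PySem.List.pyGetD_eq_getElem numbers 0 hj.1 (by omega),
        PySem.List.pyGetD_eq_getElem (numbers.take n) 0 hj.1 (by rw [hlen]; omega)]
      rw [List.getElem_take]
    simp only [hget]
  rw [hcongr]
  have hrange : PySem.List.pyRange 0 (n : Int) 1
      = PySem.List.pyRange 0 ((numbers.take n).length : Int) 1 := by rw [hlen]
  rw [hrange, PySem.List.foldl_pyRange_zero_pyGetD' (numbers.take n) 0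
    (fun (s : Int × Int × Int) x => (s.1 + x, s.2.1 + x * x, s.2.2 + x * x * x)) (0, 0, 0)]
  rw [pv_fold3]
  simp only [zero_add]
  rw [pv_newton3]
  rw [PySem.Int.floordiv_eq_ediv_of_pos (by norm_num),
    Int.mul_ediv_cancel_left _ (by norm_num : (6 : Int) ≠ 0),
    PySem.Int.mod_eq_emod_of_pos (by norm_num)]

-- A computes pvE3 of the first `quantity` elements, mod p
theorem pv_a_eq (quantity : Int) (numbers : List Int) (h0 : 0 ≤ quantity)
    (h : quantity ≤ (numbers.length : Int)) :
    trial_product quantity numbers = pvE3 (numbers.take quantity.toNat) % 1000000007 := by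
  lift quantity to Nat using h0 with n
  have hn : n ≤ numbers.length := by exact_mod_cast h
  have hlen : (numbers.take n).length = n := by
    rw [List.length_take]; omega
  simp only [trial_product, Int.toNat_natCast]
  have h1 : PySem.List.pyRange ((n : Int) - 1) (-1) (-1)
      = (List.range n).map (fun (k : Nat) => (n : Int) - 1 - (k : Int)) := by
    rw [PySem.List.pyRange_neg_one]
    have : ((n : Int) - 1 - -1).toNat = n := by omega
    rw [this]
  rw [h1, pv_build_eq numbers n hn n le_rfl]
  have h2 : PySem.List.pyRange 0 ((n : Int) - 2) 1
      = (List.range ((n : Int) - 2 - 0).toNat).map (fun (k : Nat) => (0 : Int) + (k : Int)) := by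
    rw [PySem.List.pyRange_one]
  rw [h2, pv_summa_eq]
  -- it remains to evaluate the exact sum
  congr 1
  by_cases h3 : n ≤ 2
  · have hm2 : ((n : Int) - 2 - 0).toNat = 0 := by omega
    rw [hm2, pvE3_short (numbers.take n) (by rw [hlen]; omega)]
    simp
  · push Not at h3
    have hm2 : ((n : Int) - 2 - 0).toNat = n - 2 := by omega
    rw [hm2]
    -- abbreviations
    have hPSget : ∀ (j : Nat), j < n →
        PySem.List.pyGetD ((List.range n).map
          (fun k => pvP1 ((numbers.take n).drop (n - 1 - k)))) ((j : Nat) : Int) 0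
        = pvP1 ((numbers.take n).drop (n - 1 - j)) := by
      intro j hj
      rw [PySem.List.pyGetD_natCast, List.getD_eq_getElem?_getD, List.getElem?_map,
        List.getElem?_range hj]
      rfl
    have hPSlast : PySem.List.pyGetD ((List.range n).map
        (fun k => pvP1 ((numbers.take n).drop (n - 1 - k)))) (-1) 0
        = pvP1 (numbers.take n) := by
      have hr : List.range n = List.range (n - 1) ++ [n - 1] := by
        have : n = (n - 1) + 1 := by omega
        rw [this, List.range_succ]
        congr 1
      rw [hr, List.map_append]
      simp only [List.map_cons, List.map_nil]
      rw [PySem.List.pyGetD_neg_one_append_singleton]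
      have : n - 1 - (n - 1) = 0 := by omega
      rw [this, List.drop_zero]
    have hstep : ∀ i ∈ Finset.range (n - 2),
        pvP1 ((numbers.take n).drop (n - 1 - i)) *
          PySem.List.pyGetD numbers ((n : Int) - (i : Int) - 2) 0 *
          (pvP1 (numbers.take n) - pvP1 ((numbers.take n).drop (n - 1 - (i + 1))))
        = pvP1 ((numbers.take n).drop ((n - 2 - i) + 1)) *
            (numbers.take n).getD (n - 2 - i) 0 * pvP1 ((numbers.take n).take (n - 2 - i)) := by
      intro i hi
      rw [Finset.mem_range] at hi
      have e1 : n - 1 - i = (n - 2 - i) + 1 := by omega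
      have e2 : n - 1 - (i + 1) = n - 2 - i := by omega
      have e3 : ((n : Int) - (i : Int) - 2) = ((n - 2 - i : Nat) : Int) := by omega
      have e4 : PySem.List.pyGetD numbers ((n : Int) - (i : Int) - 2) 0
          = (numbers.take n).getD (n - 2 - i) 0 := by
        rw [e3, PySem.List.pyGetD_natCast, List.getD_eq_getElem?_getD,
          List.getD_eq_getElem?_getD, List.getElem?_take]
        rw [if_pos (by omega)]
      have e5 : pvP1 (numbers.take n) - pvP1 ((numbers.take n).drop (n - 2 - i))
          = pvP1 ((numbers.take n).take (n - 2 - i)) := by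
        rw [← pvP1_take_drop (numbers.take n) (n - 2 - i)]
        ring
      rw [e1, e2, e4, e5]
    have hsum : ∑ i ∈ Finset.range (n - 2),
        PySem.List.pyGetD ((List.range n).map
          (fun k => pvP1 ((numbers.take n).drop (n - 1 - k)))) ((i : Nat) : Int) 0 *
        PySem.List.pyGetD numbers ((n : Int) - ((i : Nat) : Int) - 2) 0 *
        (PySem.List.pyGetD ((List.range n).map
          (fun k => pvP1 ((numbers.take n).drop (n - 1 - k)))) (-1) 0 -
         PySem.List.pyGetD ((List.range n).map
          (fun k => pvP1 ((numbers.take n).drop (n - 1 - k)))) (((i : Nat) : Int) + 1) 0)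
        = ∑ i ∈ Finset.range (n - 2),
          pvP1 ((numbers.take n).drop ((n - 2 - i) + 1)) *
            (numbers.take n).getD (n - 2 - i) 0 * pvP1 ((numbers.take n).take (n - 2 - i)) := by
      refine Finset.sum_congr rfl (fun i hi => ?_)
      have hi' : i < n - 2 := Finset.mem_range.mp hi
      have hcast : ((i : Nat) : Int) + 1 = (((i + 1 : Nat)) : Int) := by push_cast; ring
      rw [hPSget i (by omega), hcast, hPSget (i + 1) (by omega), hPSlast]
      exact hstep i hi
    rw [hsum]
    -- reflect the sum and extend it to all positions
    have hrefl : ∑ i ∈ Finset.range (n - 2),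
        pvP1 ((numbers.take n).drop ((n - 2 - i) + 1)) *
          (numbers.take n).getD (n - 2 - i) 0 * pvP1 ((numbers.take n).take (n - 2 - i))
        = ∑ k ∈ Finset.range (n - 2),
          pvP1 ((numbers.take n).drop ((k + 1) + 1)) *
            (numbers.take n).getD (k + 1) 0 * pvP1 ((numbers.take n).take (k + 1)) := by
      rw [← Finset.sum_range_reflect (fun k =>
        pvP1 ((numbers.take n).drop ((k + 1) + 1)) *
          (numbers.take n).getD (k + 1) 0 * pvP1 ((numbers.take n).take (k + 1))) (n - 2)]
      refine Finset.sum_congr rfl (fun i hi => ?_)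
      have hi' : i < n - 2 := Finset.mem_range.mp hi
      have : (n - 2) - 1 - i + 1 = n - 2 - i := by omega
      rw [this]
    rw [hrefl]
    have hext : ∑ j ∈ Finset.range n,
        pvP1 ((numbers.take n).drop (j + 1)) *
          (numbers.take n).getD j 0 * pvP1 ((numbers.take n).take j)
        = ∑ k ∈ Finset.range (n - 2),
          pvP1 ((numbers.take n).drop ((k + 1) + 1)) *
            (numbers.take n).getD (k + 1) 0 * pvP1 ((numbers.take n).take (k + 1)) := by
      have hr : Finset.range n = Finset.range (((n - 2) + 1) + 1) := by
        congr 1; omega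
      rw [hr, Finset.sum_range_succ', Finset.sum_range_succ]
      have hz0 : pvP1 ((numbers.take n).drop (0 + 1)) *
          (numbers.take n).getD 0 0 * pvP1 ((numbers.take n).take 0) = 0 := by
        simp [pvP1]
      have hztop : (numbers.take n).drop ((n - 2 + 1) + 1) = [] := by
        apply List.drop_eq_nil_of_le
        rw [hlen]; omega
      rw [hz0, hztop]
      simp [pvP1]
    rw [← hext]
    have htri := pv_tri (numbers.take n)
    rw [hlen] at htri
    exact htri

-- ===== VERDICT (by name: the statement is the Claim_ definition above) =====
theorem trial_product_spec : Claim_equal_trial_product := by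
  intro quantity numbers _ hpre
  unfold Spec_trial_product
  by_cases h0 : 0 ≤ quantity
  · rw [pv_a_eq quantity numbers h0 hpre, pv_alt_eq quantity numbers h0 hpre]
  · push Not at h0
    -- quantity < 0: both loops are empty and both sides are 0
    have ha : trial_product quantity numbers = 0 := by
      unfold trial_product
      rw [PySem.List.pyRange_one, PySem.List.pyRange_neg_one]
      have h1 : (quantity - 1 - -1).toNat = 0 := by omega
      have h2 : (quantity - 2 - 0).toNat = 0 := by omega
      rw [h1, h2]
      simp
    have hb : trial_product_alt quantity numbers = 0 := by
      unfold trial_product_alt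
      rw [PySem.List.pyRange_one]
      have h1 : (quantity - 0).toNat = 0 := by omega
      rw [h1]
      simp
    rw [ha, hb]
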